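-- pv_equiv track=rewrite | github.com/TimRhr/EnhancementEngine | enhancement_engine/core/crispr.py | _matches_pam
-- ===== SOURCE A (Python) =====
-- def _matches_pam(sequence: str, pam_pattern: str) -> bool:
--     """Check if sequence matches PAM pattern."""
--     if len(sequence) != len(pam_pattern):
--         return False
--
--     for seq_char, pat_char in zip(sequence.upper(), pam_pattern.upper()):
--         if pat_char == "N":
--             continue
--         elif pat_char != seq_char:
--             return False
--
--     return True
-- ===== SOURCE B (Python) =====
-- def _matches_pam(sequence: str, pam_pattern: str) -> bool:
--     """Check if sequence matches PAM pattern."""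
--     s = sequence.upper()
--     p = pam_pattern.upper()
--     masked = "".join("N" if i < len(p) and p[i] == "N" else ch
--                      for i, ch in enumerate(s))
--     return masked == p
-- ===== Notes on version B (the rewrite author's own statement) =====
-- stated objective: alternative
-- what changed: Instead of an explicit length check plus an early-exit char-by-char scan, B overwrites the sequence's characters at the pattern's wildcard ('N') positions with 'N' and decides the match by a single string equality with the pattern (unequal lengths fail the equality automatically).
import Mathlib
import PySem

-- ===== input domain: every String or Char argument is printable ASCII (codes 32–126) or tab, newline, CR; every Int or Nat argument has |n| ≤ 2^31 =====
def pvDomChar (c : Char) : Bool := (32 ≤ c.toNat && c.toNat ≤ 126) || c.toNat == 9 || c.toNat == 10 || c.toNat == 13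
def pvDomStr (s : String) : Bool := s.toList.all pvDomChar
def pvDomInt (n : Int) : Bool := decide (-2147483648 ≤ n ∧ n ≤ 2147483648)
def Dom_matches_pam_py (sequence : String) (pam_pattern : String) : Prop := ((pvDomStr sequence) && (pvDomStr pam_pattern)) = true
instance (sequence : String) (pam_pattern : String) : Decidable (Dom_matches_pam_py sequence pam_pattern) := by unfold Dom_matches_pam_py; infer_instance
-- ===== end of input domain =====

-- B replaces A's length check + early-exit scan by building a wildcard-masked copy of the sequence and one string equality (alternative decomposition, same cost).

-- ===== PORT A =====
-- the for-loop over zip(sequence.upper(), pam_pattern.upper()) with early return False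
def pvLoopA : List (Char × Char) → Bool
  | [] => true
  | (sc, pc) :: rest => if pc = 'N' then pvLoopA rest else if pc ≠ sc then false else pvLoopA rest

def matches_pam_py (sequence : String) (pam_pattern : String) : Bool :=
  if sequence.toList.length ≠ pam_pattern.toList.length then false
  else pvLoopA ((PySem.Chars.upper sequence.toList).zip (PySem.Chars.upper pam_pattern.toList))

-- ===== PORT B =====
-- the generator: for i, ch in enumerate(s) yield 'N' if i < len(p) and p[i] == 'N' else ch
def pvMaskB (p : List Char) (i : Nat) : List Char → List Char
  | [] => []
  | ch :: rest => (if i < p.length && (p.getD i ' ' == 'N') then 'N' else ch) :: pvMaskB p (i + 1) rest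

def matches_pam_py_alt (sequence : String) (pam_pattern : String) : Bool :=
  let s := PySem.Chars.upper sequence.toList
  let p := PySem.Chars.upper pam_pattern.toList
  pvMaskB p 0 s == p

-- ===== PRECONDITION & SPEC =====
def Spec_matches_pam_py (sequence : String) (pam_pattern : String) (out : Bool) : Prop := out = matches_pam_py_alt sequence pam_pattern
instance (sequence : String) (pam_pattern : String) (out : Bool) : Decidable (Spec_matches_pam_py sequence pam_pattern out) := by unfold Spec_matches_pam_py; infer_instance

-- ===== CLAIM (what is proved, stated in full; the proofs are below) =====
def Claim_equal_matches_pam_py : Prop := ∀ (sequence : String) (pam_pattern : String), Dom_matches_pam_py sequence pam_pattern → Spec_matches_pam_py sequence pam_pattern (matches_pam_py sequence pam_pattern)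

-- ===== LEMMAS AND PROOFS =====

theorem pvMaskB_length (p : List Char) (i : Nat) (s : List Char) :
    (pvMaskB p i s).length = s.length := by
  induction s generalizing i with
  | nil => rfl
  | cons ch rest ih => simp [pvMaskB, ih]

theorem pvMaskB_of_le (p : List Char) (i : Nat) (s : List Char) (h : p.length ≤ i) :
    pvMaskB p i s = s := by
  induction s generalizing i with
  | nil => rfl
  | cons ch rest ih =>
      have hni : ¬ i < p.length := by omega
      rw [pvMaskB, if_neg (by simp [hni]), ih (i + 1) (by omega)]

theorem pvMaskB_shift (s : List Char) : ∀ (pre p : List Char),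
    pvMaskB (pre ++ p) pre.length s = pvMaskB p 0 s := by
  induction s with
  | nil => intro pre p; rfl
  | cons ch rest ih =>
      intro pre p
      cases p with
      | nil =>
          rw [pvMaskB_of_le _ _ _ (by simp), pvMaskB_of_le _ _ _ (by simp)]
      | cons pc pt =>
          have hrec : pvMaskB (pre ++ pc :: pt) (pre.length + 1) rest
              = pvMaskB pt 0 rest := by
            have := ih (pre ++ [pc]) pt
            simpa using this
          have hrhs : pvMaskB (pc :: pt) 1 rest = pvMaskB pt 0 rest := by
            have := ih [pc] pt
            simpa using this
          simp [pvMaskB, hrec, hrhs]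

theorem pv_eq_len_case (s : List Char) : ∀ (p : List Char), s.length = p.length →
    pvLoopA (s.zip p) = (pvMaskB p 0 s == p) := by
  induction s with
  | nil =>
      intro p hp
      cases p with
      | nil => rfl
      | cons _ _ => simp at hp
  | cons ch rest ih =>
      intro p hp
      cases p with
      | nil => simp at hp
      | cons pc pt =>
          have hlen : rest.length = pt.length := by simpa using hp
          have htail : pvMaskB (pc :: pt) 1 rest = pvMaskB pt 0 rest := by
            simpa using pvMaskB_shift rest [pc] pt
          by_cases hN : pc = 'N'
          · subst hN
            simp [pvLoopA, pvMaskB, htail, ih pt hlen]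
          · by_cases hch : pc = ch
            · subst hch
              simp [pvLoopA, pvMaskB, hN, htail, ih pt hlen]
            · have hch' : ¬ (ch = pc) := fun h => hch h.symm
              simp [pvLoopA, pvMaskB, hN, htail, hch, hch']

theorem pv_beq_false_of_len {l p : List Char} (h : l.length ≠ p.length) :
    (l == p) = false := by
  rw [beq_eq_false_iff_ne]
  intro he; exact h (by rw [he])

-- ===== VERDICT (by name: the statement is the Claim_ definition above) =====
theorem matches_pam_py_spec : Claim_equal_matches_pam_py := by
  intro sequence pam_pattern _
  unfold Spec_matches_pam_py matches_pam_py matches_pam_py_alt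
  set s := PySem.Chars.upper sequence.toList with hs
  set p := PySem.Chars.upper pam_pattern.toList with hp
  have hls : s.length = sequence.toList.length := by
    simp [hs, PySem.Chars.upper]
  have hlp : p.length = pam_pattern.toList.length := by
    simp [hp, PySem.Chars.upper]
  by_cases hlen : sequence.toList.length = pam_pattern.toList.length
  · rw [if_neg (fun h => h hlen)]
    exact pv_eq_len_case s p (by omega)
  · have hm : (pvMaskB p 0 s).length ≠ p.length := by
      rw [pvMaskB_length]; omega
    rw [if_pos hlen, pv_beq_false_of_len hm]
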